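-- pv_equiv track=rewrite | github.com/jorgearanda/advent-of-code-2023 | day08.py | follow_ghost
-- ===== SOURCE A (Python) =====
-- from itertools import cycle
-- from math import lcm
--
-- def parse(lines):
--     return {line[:3]: (line[7:10], line[12:15]) for line in lines}
--
-- def follow_ghost(lines):
--     instructions = lines[0]
--     steps_to_z = []
--     nodes = parse(lines[2:])
--     a_nodes = [node for node in nodes if node.endswith("A")]
--     for node in a_nodes:
--         cur_node = node
--         steps = 0
--         for instruction in cycle(instructions):
--             steps += 1
--             cur_node = nodes[cur_node][0 if instruction == "L" else 1]
--             if cur_node.endswith("Z"):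
--                 break
--         steps_to_z.append(steps)
--     return lcm(*steps_to_z)
-- ===== SOURCE B (Python) =====
-- from math import lcm
--
-- def follow_ghost(lines):
--     instructions = lines[0]
--     nodes = {line[:3]: (line[7:10], line[12:15]) for line in lines[2:]}
--     ghosts = [("go", node) for node in nodes if node.endswith("A")]
--     steps = 0
--     while any(tag == "go" for tag, _ in ghosts):
--         move = instructions[steps % len(instructions)]
--         steps += 1
--
--         def advance(ghost):
--             tag, val = ghost
--             if tag == "done":
--                 return ghost
--             nxt = nodes[val][0 if move == "L" else 1]
--             return ("done", steps) if nxt.endswith("Z") else ("go", nxt)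
--
--         ghosts = [advance(g) for g in ghosts]
--     return lcm(*(val for tag, val in ghosts))
-- ===== Notes on version B (the rewrite author's own statement) =====
-- stated objective: alternative
-- what changed: B inverts the loop nesting: instead of walking each ghost independently to its first Z-node with its own fresh instruction cycle, B advances all still-active ghosts in lock-step under a single global step counter (indexing instructions by steps % len), marks each ghost done with the current step count at its first Z-node, and finally combines the recorded counts with lcm.
-- outside the precondition, e.g. on follow_ghost(['', '', 'AAA = (ZZZ, ZZZ)']): A returns 0, B raises ZeroDivisionError
import Mathlib
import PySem

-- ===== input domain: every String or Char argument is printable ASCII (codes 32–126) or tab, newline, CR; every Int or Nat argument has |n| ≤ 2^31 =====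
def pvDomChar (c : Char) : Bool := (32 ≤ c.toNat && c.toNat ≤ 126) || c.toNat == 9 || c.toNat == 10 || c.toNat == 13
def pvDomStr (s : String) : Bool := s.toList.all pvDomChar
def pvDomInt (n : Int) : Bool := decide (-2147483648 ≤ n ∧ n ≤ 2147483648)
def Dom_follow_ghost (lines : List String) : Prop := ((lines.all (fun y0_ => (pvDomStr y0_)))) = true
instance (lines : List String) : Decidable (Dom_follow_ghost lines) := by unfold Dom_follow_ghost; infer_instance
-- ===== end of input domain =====

-- B replaces A's per-ghost walks (each with its own fresh instruction cycle) by one lock-step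
-- simulation of all ghosts under a single global step counter; an alternative decomposition, not faster.


-- ===== PORT A =====
-- parse(lines): the dict comprehension {line[:3]: (line[7:10], line[12:15]) for line in lines};
-- this identical line occurs in both Pythons, so both ports share this helper.
def pvNodes (ls : List String) : PySem.Dict String (String × String) :=
  ls.foldl (fun d line =>
    d.insert (PySem.Str.slice line none (some 3))
      (PySem.Str.slice line (some 7) (some 10), PySem.Str.slice line (some 12) (some 15)))
    PySem.Dict.empty

-- fuel for the possibly-nonterminating walks of both ports: by pigeonhole over the
-- (node, instruction-position) state space, any walk of Python A that terminates at all hits its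
-- first Z-node in fewer than (len(lines)+1)*(len(instructions)+1) steps; Pre_ asserts exactly that.
def pvFuel (lines : List String) : Nat :=
  (lines.length + 1) * ((lines.headD "").toList.length + 1)

-- A's inner loop 'for instruction in cycle(instructions): …' for one ghost
-- (i = position in the cycled instruction stream, steps = A's step counter).
def pvWalkA (nd : PySem.Dict String (String × String)) (instr : List Char) :
    Nat → Nat → String → Int → Int
  | 0, _, _, steps => steps  -- fuel exhausted: Python A loops forever here; unreachable under Pre_
  | f+1, i, cur, steps =>
    if instr = [] then steps  -- cycle('') yields nothing: the loop body never runs, steps stays as is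
    else
      let instruction := instr.getD (i % instr.length) ' '
      let steps1 := steps + 1
      let cur1 :=
        match nd.get? cur with
        | some p => if instruction = 'L' then p.1 else p.2
        | none => ""  -- Python raises KeyError here; excluded by Pre_
      if PySem.Str.endswith cur1 "Z" then steps1
      else pvWalkA nd instr f (i + 1) cur1 steps1

def follow_ghost (lines : List String) : Int :=
  match PySem.List.pyGet? lines 0 with
  | none => 0  -- IndexError on lines[0]; excluded by Pre_
  | some instructions =>
    let nodes := pvNodes (PySem.List.slice lines (some 2) none)
    let a_nodes := nodes.keys.filter (fun node => PySem.Str.endswith node "A")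
    let steps_to_z :=
      a_nodes.map (fun node => pvWalkA nodes instructions.toList (pvFuel lines) 0 node 0)
    steps_to_z.foldl (fun acc s => (Int.lcm acc s : Int)) 1

-- ===== PORT B =====
-- B's per-tick 'advance' helper: a ghost is ("done", steps) ~ Sum.inl steps or ("go", cur) ~ Sum.inr cur.
def pvTickB (nd : PySem.Dict String (String × String)) (move : Char) (steps : Int) :
    Sum Int String → Sum Int String
  | Sum.inl s => Sum.inl s
  | Sum.inr cur =>
    let nxt :=
      match nd.get? cur with
      | some p => if move = 'L' then p.1 else p.2
      | none => ""  -- Python raises KeyError here; excluded by Pre_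
    if PySem.Str.endswith nxt "Z" then Sum.inl steps else Sum.inr nxt

-- B's 'while any(tag == "go" …)' loop: one tick advances every ghost.
def pvSimB (nd : PySem.Dict String (String × String)) (instr : List Char) :
    Nat → Nat → List (Sum Int String) → List (Sum Int String)
  | 0, _, ghosts => ghosts  -- fuel exhausted: Python B loops forever here; unreachable under Pre_
  | f+1, steps, ghosts =>
    if ghosts.any (fun g => g.isRight) then
      -- instructions[steps % len(instructions)]: ZeroDivisionError on empty instructions is excluded by Pre_
      let move := instr.getD (steps % instr.length) ' '
      pvSimB nd instr f (steps + 1) (ghosts.map (pvTickB nd move ((steps : Int) + 1)))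
    else ghosts

def follow_ghost_alt (lines : List String) : Int :=
  match PySem.List.pyGet? lines 0 with
  | none => 0  -- IndexError on lines[0]; excluded by Pre_
  | some instructions =>
    let nodes := pvNodes (PySem.List.slice lines (some 2) none)
    let ghosts :=
      (nodes.keys.filter (fun node => PySem.Str.endswith node "A")).map
        (fun node => (Sum.inr node : Sum Int String))
    let final := pvSimB nodes instructions.toList (pvFuel lines) 0 ghosts
    (final.map (fun g => match g with | Sum.inl s => s | Sum.inr _ => 0)).foldl
      (fun acc s => (Int.lcm acc s : Int)) 1

-- ===== PRECONDITION & SPEC =====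
-- one step of a ghost walk: none exactly where Python raises KeyError
def pvGhostStep (nd : PySem.Dict String (String × String)) (instr : List Char) (t : Nat)
    (cur : String) : Option String :=
  (nd.get? cur).map (fun p => if instr.getD (t % instr.length) ' ' = 'L' then p.1 else p.2)

def pvGhostIter (nd : PySem.Dict String (String × String)) (instr : List Char) :
    Nat → Nat → String → Option String
  | 0, _, cur => some cur
  | k+1, t, cur => (pvGhostStep nd instr t cur).bind (pvGhostIter nd instr k (t+1))

-- Pre_ excludes: an empty lines list (A raises IndexError); an empty instruction line while some
-- ghost exists (A's loop body never runs so it accidentally records 0 steps, while B raises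
-- ZeroDivisionError on steps % 0); and ghost walks that step onto a node missing from the map
-- (A raises KeyError) or never reach a Z-node within pvFuel steps (by pigeonhole A then loops
-- forever). So Pre_ holds exactly where Python A returns normally, minus the accidental
-- empty-instructions-with-a-ghost corner, on which B's natural loop raises.
def Pre_follow_ghost (lines : List String) : Prop :=
  lines ≠ [] ∧
  ∀ node ∈ (pvNodes (PySem.List.slice lines (some 2) none)).keys.filter
      (fun n => PySem.Str.endswith n "A"),
    (lines.headD "").toList ≠ [] ∧
    ∃ k < pvFuel lines,
      ((pvGhostIter (pvNodes (PySem.List.slice lines (some 2) none)) (lines.headD "").toList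
          (k+1) 0 node).any (fun z => PySem.Str.endswith z "Z")) = true

instance (lines : List String) : Decidable (Pre_follow_ghost lines) := by
  unfold Pre_follow_ghost; infer_instance

def pvWitness_follow_ghost : List String := ["R", "", "AAA = (BBB, ZZZ)"]

def Spec_follow_ghost (lines : List String) (out : Int) : Prop := out = follow_ghost_alt lines
instance (lines : List String) (out : Int) : Decidable (Spec_follow_ghost lines out) := by unfold Spec_follow_ghost; infer_instance

-- ===== CLAIM (what is proved, stated in full; the proofs are below) =====
def Claim_equal_follow_ghost : Prop := ∀ (lines : List String), Dom_follow_ghost lines → Pre_follow_ghost lines → Spec_follow_ghost lines (follow_ghost lines)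

-- ===== LEMMAS AND PROOFS =====

-- proof-side view of B's loop: the iterated per-ghost advance
def pvRun (nd : PySem.Dict String (String × String)) (instr : List Char) :
    Nat → Nat → Sum Int String → Sum Int String
  | 0, _, g => g
  | f+1, t, g =>
    pvRun nd instr f (t+1) (pvTickB nd (instr.getD (t % instr.length) ' ') ((t : Int) + 1) g)

lemma pvRun_inl (nd : PySem.Dict String (String × String)) (instr : List Char) :
    ∀ f t s, pvRun nd instr f t (Sum.inl s) = Sum.inl s := by
  intro f
  induction f with
  | zero => intro t s; rfl
  | succ f ih => intro t s; simp [pvRun, pvTickB, ih]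

-- B's lock-step loop acts on each ghost independently
lemma pvSimB_eq_map (nd : PySem.Dict String (String × String)) (instr : List Char) :
    ∀ f t ghosts, pvSimB nd instr f t ghosts = ghosts.map (pvRun nd instr f t) := by
  intro f
  induction f with
  | zero => intro t ghosts; simp [pvSimB, pvRun]
  | succ f ih =>
    intro t ghosts
    by_cases h : ghosts.any (fun g => g.isRight)
    · rw [pvSimB, if_pos h, ih, List.map_map]
      rfl
    · rw [pvSimB, if_neg h]
      have hall : ∀ g ∈ ghosts, pvRun nd instr (f+1) t g = g := by
        intro g hg
        cases g with
        | inl s => exact pvRun_inl nd instr (f+1) t s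
        | inr c =>
          exfalso
          exact h (List.any_eq_true.mpr ⟨Sum.inr c, hg, rfl⟩)
      calc ghosts = ghosts.map id := (List.map_id ghosts).symm
        _ = ghosts.map (pvRun nd instr (f+1) t) := (List.map_congr_left hall).symm

-- a ghost that reaches a Z-node within its fuel: B's iterated advance returns exactly
-- A's per-ghost step count (both walks stay in sync at tick t)
lemma pvRun_walk (nd : PySem.Dict String (String × String)) (instr : List Char)
    (hinstr : instr ≠ []) :
    ∀ f t cur,
      (∃ k < f, ((pvGhostIter nd instr (k+1) t cur).any
          (fun z => PySem.Str.endswith z "Z")) = true) →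
      pvRun nd instr f t (Sum.inr cur) = Sum.inl (pvWalkA nd instr f t cur (t : Int)) := by
  intro f
  induction f with
  | zero => intro t cur ⟨k, hk, _⟩; omega
  | succ f ih =>
    intro t cur ⟨k, hk, hhit⟩
    cases hstep : pvGhostStep nd instr t cur with
    | none => rw [pvGhostIter, hstep] at hhit; simp [Option.any] at hhit
    | some nxt =>
      rw [pvGhostIter, hstep] at hhit; rw [Option.bind] at hhit
      obtain ⟨p, hp, hnxt⟩ := Option.map_eq_some_iff.mp hstep
      have htick : pvTickB nd (instr.getD (t % instr.length) ' ') ((t : Int) + 1) (Sum.inr cur)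
          = if PySem.Str.endswith nxt "Z" then Sum.inl ((t : Int) + 1) else Sum.inr nxt := by
        simp only [pvTickB, hp, ← hnxt]
      have hwalk : pvWalkA nd instr (f+1) t cur (t : Int)
          = if PySem.Str.endswith nxt "Z" then (t : Int) + 1
            else pvWalkA nd instr f (t+1) nxt ((t : Int) + 1) := by
        rw [pvWalkA, if_neg hinstr]
        simp only [hp, ← hnxt]
      by_cases hZ : PySem.Str.endswith nxt "Z"
      · rw [pvRun, htick, if_pos hZ, pvRun_inl, hwalk, if_pos hZ]
      · rw [pvRun, htick, if_neg hZ, hwalk, if_neg hZ]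
        have hs : ((t + 1 : Nat) : Int) = (t : Int) + 1 := by push_cast; ring
        rw [← hs]
        apply ih
        match k with
        | 0 =>
          rw [pvGhostIter] at hhit
          simp [Option.any] at hhit
          exact absurd hhit hZ
        | k'+1 =>
          exact ⟨k', by omega, hhit⟩

theorem follow_ghost_spec_aux (lines : List String) (hpre : Pre_follow_ghost lines) :
    follow_ghost lines = follow_ghost_alt lines := by
  obtain ⟨hne, hwalks⟩ := hpre
  obtain ⟨l, ls, rfl⟩ := List.exists_cons_of_ne_nil hne
  have hget : PySem.List.pyGet? (l :: ls) (0 : Int) = some l := by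
    simp [pysem]
  rw [follow_ghost, follow_ghost_alt, hget]
  simp only
  set nd := pvNodes (PySem.List.slice (l :: ls) (some 2) none) with hnd
  set anodes := nd.keys.filter (fun node => PySem.Str.endswith node "A") with ha
  cases hanodes : anodes with
  | nil => simp [pvSimB_eq_map]
  | cons a0 arest =>
    have hinstr : l.toList ≠ [] := by
      have := hwalks a0 (by rw [hanodes]; exact List.mem_cons_self)
      simpa using this.1
    rw [pvSimB_eq_map, List.map_map, List.map_map]
    congr 1
    apply List.map_congr_left
    intro node hnode
    have hhit := (hwalks node (by rw [hanodes]; exact hnode)).2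
    have := pvRun_walk nd l.toList hinstr (pvFuel (l :: ls)) 0 node (by simpa using hhit)
    simp only [Function.comp, this, Nat.cast_zero]

-- ===== VERDICT (by name: the statement is the Claim_ definition above) =====
theorem follow_ghost_spec : Claim_equal_follow_ghost := by
  intro lines _ hpre
  unfold Spec_follow_ghost
  exact follow_ghost_spec_aux lines hpre
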